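-- pv_equiv track=rewrite | github.com/Siddhartha-Mahajan/verifier | test_verifiers.py | _build_naive_decomposition
-- ===== SOURCE A (Python) =====
-- def _build_naive_decomposition(n, m, p):
--     """
--     Build the naive (schoolbook) tensor decomposition for (n,m,p) multiplication.
--     Uses n*m*p multiplications. Term (i,k,j) computes A[i,k]*B[k,j] and adds to C[i,j].
--     """
--     R = n * m * p
--     U, V, W = [], [], []
--     for i in range(n):
--         for k in range(m):
--             for j in range(p):
--                 u = [[0]*m for _ in range(n)]
--                 u[i][k] = 1
--                 v = [[0]*p for _ in range(m)]
--                 v[k][j] = 1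
--                 w = [[0]*p for _ in range(n)]
--                 w[i][j] = 1
--                 U.append(u)
--                 V.append(v)
--                 W.append(w)
--     return R, U, V, W
-- ===== SOURCE B (Python) =====
-- def _build_naive_decomposition(n, m, p):
--     """
--     Same naive (n,m,p) decomposition, built from precomputed one-hot lookup
--     tables instead of allocating and mutating a fresh matrix per term.
--     """
--     R = n * m * p
--     if n <= 0 or m <= 0 or p <= 0:
--         return R, [], [], []
--
--     def onehot(r, c, a, b):
--         return [[1 if (x == a and y == b) else 0 for y in range(c)] for x in range(r)]
--
--     Ucache = [[onehot(n, m, i, k) for k in range(m)] for i in range(n)]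
--     Vcache = [[onehot(m, p, k, j) for j in range(p)] for k in range(m)]
--     Wcache = [[onehot(n, p, i, j) for j in range(p)] for i in range(n)]
--
--     U = [Ucache[i][k] for i in range(n) for k in range(m) for _ in range(p)]
--     V = [Vcache[k][j] for _ in range(n) for k in range(m) for j in range(p)]
--     W = [Wcache[i][j] for i in range(n) for _ in range(m) for j in range(p)]
--     return R, U, V, W
-- ===== Notes on version B (the rewrite author's own statement) =====
-- stated objective: alternative
-- what changed: B returns early when any dimension is nonpositive, and otherwise precomputes one-hot U/V/W lookup tables once (each built by a conditional comprehension instead of allocate-then-mutate) and assembles each of U, V, W by its own independent comprehension over the index triples, replacing A's single fused triple loop that allocates and mutates three fresh matrices per term.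
import Mathlib
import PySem

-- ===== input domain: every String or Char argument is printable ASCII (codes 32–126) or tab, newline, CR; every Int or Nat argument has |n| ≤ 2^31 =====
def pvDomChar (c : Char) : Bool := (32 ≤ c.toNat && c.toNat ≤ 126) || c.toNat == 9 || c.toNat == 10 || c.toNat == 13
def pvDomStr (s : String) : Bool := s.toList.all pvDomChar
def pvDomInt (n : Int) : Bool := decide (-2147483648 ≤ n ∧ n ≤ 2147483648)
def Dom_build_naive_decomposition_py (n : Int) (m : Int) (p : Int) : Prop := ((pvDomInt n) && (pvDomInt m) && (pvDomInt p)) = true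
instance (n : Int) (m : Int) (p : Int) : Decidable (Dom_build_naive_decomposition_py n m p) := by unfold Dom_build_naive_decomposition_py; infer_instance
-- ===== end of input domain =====

-- B replaces A's fused triple loop (fresh zero matrix allocated and mutated per term)
-- by precomputed one-hot lookup tables and three independent comprehensions; objective: alternative.

-- ===== PORT A =====
-- Literal port of A: triple loop over range(n), range(m), range(p); each iteration
-- allocates fresh zero matrices ([0]*m rows), mutates one entry (pyGetD/pySetD model
-- u[i][k] = 1 on the always-in-range indices), and appends to U, V, W.
def build_naive_decomposition_py (n : Int) (m : Int) (p : Int) : Int × List (List (List Int)) × List (List (List Int)) × List (List (List Int)) :=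
  let R := n * m * p
  let st := (PySem.List.pyRange 0 n 1).foldl (fun (acc : List (List (List Int)) × List (List (List Int)) × List (List (List Int))) i =>
    (PySem.List.pyRange 0 m 1).foldl (fun acc k =>
      (PySem.List.pyRange 0 p 1).foldl (fun acc j =>
        let u0 := (PySem.List.pyRange 0 n 1).map (fun _ => PySem.List.pyRepeat [(0:Int)] m)
        let u := PySem.List.pySetD u0 i (PySem.List.pySetD (PySem.List.pyGetD u0 i []) k 1)
        let v0 := (PySem.List.pyRange 0 m 1).map (fun _ => PySem.List.pyRepeat [(0:Int)] p)
        let v := PySem.List.pySetD v0 k (PySem.List.pySetD (PySem.List.pyGetD v0 k []) j 1)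
        let w0 := (PySem.List.pyRange 0 n 1).map (fun _ => PySem.List.pyRepeat [(0:Int)] p)
        let w := PySem.List.pySetD w0 i (PySem.List.pySetD (PySem.List.pyGetD w0 i []) j 1)
        (acc.1 ++ [u], acc.2.1 ++ [v], acc.2.2 ++ [w])) acc) acc) ([], [], [])
  (R, st.1, st.2.1, st.2.2)

-- ===== PORT B =====
-- onehot(r, c, a, b): matrix built directly by a conditional comprehension.
def pvOnehot (r c a b : Int) : List (List Int) :=
  (PySem.List.pyRange 0 r 1).map (fun x =>
    (PySem.List.pyRange 0 c 1).map (fun y => if x = a ∧ y = b then 1 else 0))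

-- Port of B: early return when there are no terms, else three caches and
-- three independent comprehensions indexing them.
-- Cache indices are always in range here, so pyGetD with default [] is exact.
def build_naive_decomposition_py_alt (n : Int) (m : Int) (p : Int) : Int × List (List (List Int)) × List (List (List Int)) × List (List (List Int)) :=
  let R := n * m * p
  if n ≤ 0 ∨ m ≤ 0 ∨ p ≤ 0 then (R, [], [], []) else
  let Ucache := (PySem.List.pyRange 0 n 1).map (fun i => (PySem.List.pyRange 0 m 1).map (fun k => pvOnehot n m i k))
  let Vcache := (PySem.List.pyRange 0 m 1).map (fun k => (PySem.List.pyRange 0 p 1).map (fun j => pvOnehot m p k j))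
  let Wcache := (PySem.List.pyRange 0 n 1).map (fun i => (PySem.List.pyRange 0 p 1).map (fun j => pvOnehot n p i j))
  let U := (PySem.List.pyRange 0 n 1).flatMap (fun i => (PySem.List.pyRange 0 m 1).flatMap (fun k =>
    (PySem.List.pyRange 0 p 1).map (fun _ => PySem.List.pyGetD (PySem.List.pyGetD Ucache i []) k [])))
  let V := (PySem.List.pyRange 0 n 1).flatMap (fun _ => (PySem.List.pyRange 0 m 1).flatMap (fun k =>
    (PySem.List.pyRange 0 p 1).map (fun j => PySem.List.pyGetD (PySem.List.pyGetD Vcache k []) j [])))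
  let W := (PySem.List.pyRange 0 n 1).flatMap (fun i => (PySem.List.pyRange 0 m 1).flatMap (fun _ =>
    (PySem.List.pyRange 0 p 1).map (fun j => PySem.List.pyGetD (PySem.List.pyGetD Wcache i []) j [])))
  (R, U, V, W)

-- ===== PRECONDITION & SPEC =====
def Spec_build_naive_decomposition_py (n : Int) (m : Int) (p : Int) (out : Int × List (List (List Int)) × List (List (List Int)) × List (List (List Int))) : Prop := out = build_naive_decomposition_py_alt n m p
instance (n : Int) (m : Int) (p : Int) (out : Int × List (List (List Int)) × List (List (List Int)) × List (List (List Int))) : Decidable (Spec_build_naive_decomposition_py n m p out) := by unfold Spec_build_naive_decomposition_py; infer_instance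

-- ===== CLAIM (what is proved, stated in full; the proofs are below) =====
def Claim_equal_build_naive_decomposition_py : Prop := ∀ (n : Int) (m : Int) (p : Int), Dom_build_naive_decomposition_py n m p → Spec_build_naive_decomposition_py n m p (build_naive_decomposition_py n m p)

-- ===== LEMMAS AND PROOFS =====

-- A fold that appends to each component of a triple of lists is a triple of flatMaps.
theorem pvTriFoldl {α β γ δ : Type} (l : List α) (f : α → List β) (g : α → List γ) (h : α → List δ) :
    ∀ (s : List β × List γ × List δ),
      l.foldl (fun acc x => (acc.1 ++ f x, acc.2.1 ++ g x, acc.2.2 ++ h x)) s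
        = (s.1 ++ l.flatMap f, s.2.1 ++ l.flatMap g, s.2.2 ++ l.flatMap h) := by
  induction l with
  | nil => intro s; simp
  | cons x xs ih => intro s; simp [List.foldl_cons, ih]

-- '[f x] for x in l' flattened is 'map f l'.
theorem pvFlatMapSingleton {α β : Type} (l : List α) (f : α → β) :
    l.flatMap (fun x => [f x]) = l.map f := by
  induction l with
  | nil => rfl
  | cons x xs ih => simp [List.flatMap_cons, ih]

theorem pvFlatMapCongr {α β : Type} (l : List α) (f g : α → List β)
    (h : ∀ x ∈ l, f x = g x) : l.flatMap f = l.flatMap g := by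
  induction l with
  | nil => rfl
  | cons x xs ih => simp [List.flatMap_cons, h x (by simp), ih (fun y hy => h y (by simp [hy]))]

-- One-hot row: setting entry b of a zero row equals the conditional comprehension row.
theorem pvRowLemma (c b : Int) (hb0 : 0 ≤ b) :
    (List.replicate c.toNat (0:Int)).set b.toNat 1
      = (PySem.List.pyRange 0 c 1).map (fun y => if y = b then 1 else 0) := by
  rw [PySem.List.pyRange_one]
  apply List.ext_getElem
  · simp
  · intro s hs1 hs2
    simp only [List.getElem_set, List.getElem_replicate, List.getElem_map, List.getElem_range]
    have : ((s : Int) = b) ↔ (b.toNat = s) := by omega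
    simp only [zero_add]
    by_cases hc : b.toNat = s <;> simp [hc, this]

-- A's allocate-then-mutate matrix equals B's pvOnehot, for in-range indices.
theorem pvOnehotBuild (r c a b : Int) (ha0 : 0 ≤ a) (har : a < r) (hb0 : 0 ≤ b) (_hbc : b < c) :
    PySem.List.pySetD ((PySem.List.pyRange 0 r 1).map (fun _ => PySem.List.pyRepeat [(0:Int)] c)) a
      (PySem.List.pySetD (PySem.List.pyGetD ((PySem.List.pyRange 0 r 1).map (fun _ => PySem.List.pyRepeat [(0:Int)] c)) a []) b 1)
      = pvOnehot r c a b := by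
  rw [PySem.List.pyGetD_map_pyRange_of_nonneg _ _ _ _ ha0 har]
  rw [PySem.List.pyRepeat_singleton]
  rw [PySem.List.pySetD_of_nonneg _ _ hb0, PySem.List.pySetD_of_nonneg _ _ ha0]
  unfold pvOnehot
  apply List.ext_getElem
  · simp [PySem.List.length_pyRange_one]
  · intro t ht1 ht2
    simp only [List.getElem_set, List.getElem_map, PySem.List.getElem_pyRange_one, zero_add]
    have hcast : ((t : Int) = a) ↔ (a.toNat = t) := by omega
    by_cases hc : a.toNat = t
    · rw [if_pos hc, pvRowLemma c b hb0]
      apply List.map_congr_left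
      intro y _
      simp [hcast.mpr hc]
    · rw [if_neg hc]
      have hne : ¬ ((t : Int) = a) := fun h => hc (hcast.mp h)
      have : ((PySem.List.pyRange 0 c 1).map (fun y => if (t:Int) = a ∧ y = b then (1:Int) else 0))
          = (PySem.List.pyRange 0 c 1).map (fun _ => (0:Int)) := by
        apply List.map_congr_left; intro y _; simp [hne]
      rw [this, List.map_const']
      simp [PySem.List.length_pyRange_one]

-- B's double cache lookup returns the cached one-hot matrix, for in-range indices.
theorem pvCacheGet (r c : Int) (F : Int → Int → List (List Int)) (a b : Int)
    (ha0 : 0 ≤ a) (har : a < r) (hb0 : 0 ≤ b) (hbc : b < c) :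
    PySem.List.pyGetD (PySem.List.pyGetD
      ((PySem.List.pyRange 0 r 1).map (fun x => (PySem.List.pyRange 0 c 1).map (fun y => F x y))) a [])
      b [] = F a b := by
  rw [PySem.List.pyGetD_map_pyRange_of_nonneg _ _ _ _ ha0 har]
  rw [PySem.List.pyGetD_map_pyRange_of_nonneg _ _ _ _ hb0 hbc]

-- ===== VERDICT (by name: the statement is the Claim_ definition above) =====
theorem build_naive_decomposition_py_spec : Claim_equal_build_naive_decomposition_py := by
  intro n m p _
  unfold Spec_build_naive_decomposition_py build_naive_decomposition_py build_naive_decomposition_py_alt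
  simp only [pvTriFoldl, List.nil_append, pvFlatMapSingleton]
  by_cases hdeg : n ≤ 0 ∨ m ≤ 0 ∨ p ≤ 0
  · rw [if_pos hdeg]
    refine Prod.ext rfl (Prod.ext ?_ (Prod.ext ?_ ?_)) <;>
      (rcases hdeg with h | h | h <;>
        simp [PySem.List.pyRange_one_eq_nil h])
  rw [if_neg hdeg]
  refine Prod.ext rfl (Prod.ext ?_ (Prod.ext ?_ ?_)) <;>
    (apply pvFlatMapCongr; intro i hi;
     rcases (PySem.List.mem_pyRange_one).1 hi with ⟨hi0, hin⟩;
     apply pvFlatMapCongr; intro k hk;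
     rcases (PySem.List.mem_pyRange_one).1 hk with ⟨hk0, hkm⟩;
     apply List.map_congr_left; intro j hj;
     rcases (PySem.List.mem_pyRange_one).1 hj with ⟨hj0, hjp⟩)
  · rw [pvOnehotBuild n m i k hi0 hin hk0 hkm,
        pvCacheGet n m (fun i k => pvOnehot n m i k) i k hi0 hin hk0 hkm]
  · rw [pvOnehotBuild m p k j hk0 hkm hj0 hjp,
        pvCacheGet m p (fun k j => pvOnehot m p k j) k j hk0 hkm hj0 hjp]
  · rw [pvOnehotBuild n p i j hi0 hin hj0 hjp,
        pvCacheGet n p (fun i j => pvOnehot n p i j) i j hi0 hin hj0 hjp]
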